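-- pv_equiv track=rewrite | github.com/RanLH/PairwiseDistances | ed.py | EDalignments
-- ===== SOURCE A (Python) =====
-- def EDalignments(S1, S2, memo = {}):
--     """ Takes two strings as input and returns an ordered pair comprising the
--         optimal edit distance and a list of all of alignments with that score. """
--     if (S1, S2) in memo: return memo[(S1, S2)]
--     if S1 == "": return (len(S2), [("_"*len(S2), S2)])
--     elif S2 == "": return (len(S1), [(S1, "_"*len(S1))])
--     elif S1[-1] == S2[-1]:
--         score, subsolutions = EDalignments(S1[:-1], S2[:-1])
--         solutions = [(x + S1[-1], y + S2[-1]) for (x, y) in subsolutions]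
--         package = (score, solutions)
--         memo[(S1, S2)] = package
--         return package
--     else:
--         alignments = []
--         option1, alignments1 = EDalignments(S1, S2[:-1])
--         option2, alignments2 = EDalignments(S1[:-1], S2)
--         option3, alignments3 = EDalignments(S1[:-1], S2[:-1])
--         optimal = min(option1, option2, option3)
--         if option1 == optimal:
--             alignments.extend([(x+"_", y+S2[-1]) for (x, y) in alignments1])
--         if option2 == optimal:
--             alignments.extend([(x+S1[-1], y+"_") for (x, y) in alignments2])
--         if option3 == optimal:
--             alignments.extend([(x + S1[-1], y + S2[-1]) for (x, y) in alignments3])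
--         package = (optimal+1, alignments)
--         memo[(S1, S2)] = package
--         return package
-- ===== SOURCE B (Python) =====
-- def EDalignments(S1, S2, memo = {}):
--     """ Takes two strings and returns the optimal edit distance together with
--         the list of all alignments with that score, computed by filling the
--         full DP table bottom-up row by row instead of memoized recursion.
--         The memo parameter is kept for signature compatibility and unused. """
--     n = len(S2)
--     prev = [(j, [("_" * j, S2[:j])]) for j in range(n + 1)]
--     for i in range(1, len(S1) + 1):
--         c1 = S1[i - 1]
--         cur = [(i, [(S1[:i], "_" * i)])]
--         for j in range(1, n + 1):
--             c2 = S2[j - 1]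
--             if c1 == c2:
--                 s, sols = prev[j - 1]
--                 cur.append((s, [(x + c1, y + c2) for (x, y) in sols]))
--             else:
--                 o1, a1 = cur[j - 1]
--                 o2, a2 = prev[j]
--                 o3, a3 = prev[j - 1]
--                 m = min(o1, o2, o3)
--                 al = []
--                 if o1 == m:
--                     al.extend([(x + "_", y + c2) for (x, y) in a1])
--                 if o2 == m:
--                     al.extend([(x + c1, y + "_") for (x, y) in a2])
--                 if o3 == m:
--                     al.extend([(x + c1, y + c2) for (x, y) in a3])
--                 cur.append((m + 1, al))
--         prev = cur
--     return prev[n]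
-- ===== Notes on version B (the rewrite author's own statement) =====
-- stated objective: alternative
-- what changed: Replaced A's top-down memoized recursion on string suffixes with an iterative bottom-up DP that fills the whole (score, alignments) table row by row and reads the answer from the last cell.
import Mathlib
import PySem

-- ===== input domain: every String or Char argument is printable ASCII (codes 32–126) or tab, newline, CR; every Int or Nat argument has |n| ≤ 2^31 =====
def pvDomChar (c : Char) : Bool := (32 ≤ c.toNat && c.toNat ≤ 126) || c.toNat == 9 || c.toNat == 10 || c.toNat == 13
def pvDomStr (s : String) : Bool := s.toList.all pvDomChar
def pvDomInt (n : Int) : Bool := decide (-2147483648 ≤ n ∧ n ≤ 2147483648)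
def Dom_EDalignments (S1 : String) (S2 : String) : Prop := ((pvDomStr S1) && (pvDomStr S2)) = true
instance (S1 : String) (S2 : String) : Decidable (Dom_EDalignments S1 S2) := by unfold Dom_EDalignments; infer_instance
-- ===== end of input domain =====

-- B replaces A's memoized recursion by an iterative bottom-up row DP (alternative decomposition, same values).
-- Python's memo={} default parameter only caches pure results and never changes the return value; it has no Lean counterpart.

-- ===== PORT A =====
-- A's recursion, step for step, over the characters of the strings (Python strings are
-- their character sequences; S[-1] on a nonempty string is its last char = getLastD,
-- S[:-1] is dropLast, "_"*len(S) is List.replicate, + on strings is list append).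
def edA : List Char → List Char → Int × List (List Char × List Char)
  | xs, ys =>
    if _hx : xs = [] then ((ys.length : Int), [(List.replicate ys.length '_', ys)])
    else if _hy : ys = [] then ((xs.length : Int), [(xs, List.replicate xs.length '_')])
    else
      let x := xs.getLastD ' '
      let y := ys.getLastD ' '
      if x = y then
        let r := edA xs.dropLast ys.dropLast
        (r.1, r.2.map (fun p => (p.1 ++ [x], p.2 ++ [y])))
      else
        let r1 := edA xs ys.dropLast
        let r2 := edA xs.dropLast ys
        let r3 := edA xs.dropLast ys.dropLast
        let m := min r1.1 (min r2.1 r3.1)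
        let al :=
          (if r1.1 = m then r1.2.map (fun p => (p.1 ++ ['_'], p.2 ++ [y])) else [])
          ++ (if r2.1 = m then r2.2.map (fun p => (p.1 ++ [x], p.2 ++ ['_'])) else [])
          ++ (if r3.1 = m then r3.2.map (fun p => (p.1 ++ [x], p.2 ++ [y])) else [])
        (m + 1, al)
termination_by xs ys => xs.length + ys.length
decreasing_by
  all_goals
    have h1 : 0 < xs.length := List.length_pos_of_ne_nil _hx
    have h2 : 0 < ys.length := List.length_pos_of_ne_nil _hy
    simp [List.length_dropLast]; omega

def EDalignments (S1 : String) (S2 : String) : Int × (List (String × String)) :=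
  let r := edA S1.toList S2.toList
  (r.1, r.2.map (fun p => (String.ofList p.1, String.ofList p.2)))

-- ===== PORT B =====
-- Source B's inner loop over j: consumes the remaining columns cs together with the tail of
-- the previous row starting at prev[j-1] (= d, then u = prev[j]); left is cur[j-1].
def edBrowGo (c1 : Char) (left : Int × List (List Char × List Char)) :
    List (Int × List (List Char × List Char)) → List Char →
    List (Int × List (List Char × List Char))
  | d :: u :: rest, c2 :: cs =>
      let cell :=
        if c1 = c2 then
          (d.1, d.2.map (fun p => (p.1 ++ [c1], p.2 ++ [c2])))
        else
          let m := min left.1 (min u.1 d.1)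
          let al :=
            (if left.1 = m then left.2.map (fun p => (p.1 ++ ['_'], p.2 ++ [c2])) else [])
            ++ (if u.1 = m then u.2.map (fun p => (p.1 ++ [c1], p.2 ++ ['_'])) else [])
            ++ (if d.1 = m then d.2.map (fun p => (p.1 ++ [c1], p.2 ++ [c2])) else [])
          (m + 1, al)
      cell :: edBrowGo c1 cell (u :: rest) cs
  | _, _ => []

-- Source B's outer loop over i: one row per character of S1; pfx is S1[:i-1].
def edBrows (ys : List Char) : List Char → List Char →
    List (Int × List (List Char × List Char)) → List (Int × List (List Char × List Char))
  | [], _pfx, prev => prev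
  | c1 :: xs, pfx, prev =>
      let base : Int × List (List Char × List Char) :=
        (((pfx.length : Int) + 1), [(pfx ++ [c1], List.replicate (pfx.length + 1) '_')])
      edBrows ys xs (pfx ++ [c1]) (base :: edBrowGo c1 base prev ys)

def EDalignments_alt (S1 : String) (S2 : String) : Int × (List (String × String)) :=
  let ys := S2.toList
  let row0 := (List.range (ys.length + 1)).map
    (fun j => ((Int.ofNat j), [(List.replicate j '_', ys.take j)]))
  let fin := edBrows ys S1.toList [] row0
  let r := fin.getLastD (0, [])
  (r.1, r.2.map (fun p => (String.ofList p.1, String.ofList p.2)))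

-- ===== PRECONDITION & SPEC =====
def Spec_EDalignments (S1 : String) (S2 : String) (out : Int × (List (String × String))) : Prop := out = EDalignments_alt S1 S2
instance (S1 : String) (S2 : String) (out : Int × (List (String × String))) : Decidable (Spec_EDalignments S1 S2 out) := by unfold Spec_EDalignments; infer_instance

-- ===== CLAIM (what is proved, stated in full; the proofs are below) =====
def Claim_equal_EDalignments : Prop := ∀ (S1 : String) (S2 : String), Dom_EDalignments S1 S2 → Spec_EDalignments S1 S2 (EDalignments S1 S2)

-- ===== LEMMAS AND PROOFS =====

-- the cells of A's row for prefix p, columns t++[c], t++[c,c'], …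
def Atail (p : List Char) : List Char → List Char → List (Int × List (List Char × List Char))
  | _t, [] => []
  | t, c :: r => edA p (t ++ [c]) :: Atail p (t ++ [c]) r

theorem edA_nil_left (ys : List Char) :
    edA [] ys = ((ys.length : Int), [(List.replicate ys.length '_', ys)]) := by
  rw [edA]; simp

theorem edA_snoc_nil (p : List Char) (x : Char) :
    edA (p ++ [x]) [] = ((p.length : Int) + 1, [(p ++ [x], List.replicate (p.length + 1) '_')]) := by
  rw [edA]; simp

theorem edA_snoc (p t : List Char) (x c : Char) :
    edA (p ++ [x]) (t ++ [c]) =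
      if x = c then
        (( edA p t).1, (edA p t).2.map (fun q => (q.1 ++ [x], q.2 ++ [c])))
      else
        let r1 := edA (p ++ [x]) t
        let r2 := edA p (t ++ [c])
        let r3 := edA p t
        let m := min r1.1 (min r2.1 r3.1)
        ((m + 1),
          (if r1.1 = m then r1.2.map (fun q => (q.1 ++ ['_'], q.2 ++ [c])) else [])
          ++ (if r2.1 = m then r2.2.map (fun q => (q.1 ++ [x], q.2 ++ ['_'])) else [])
          ++ (if r3.1 = m then r3.2.map (fun q => (q.1 ++ [x], q.2 ++ [c])) else [])) := by
  rw [edA]; simp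

theorem rowGo_spec (p : List Char) (x : Char) :
    ∀ (r t : List Char),
      edBrowGo x (edA (p ++ [x]) t) (edA p t :: Atail p t r) r = Atail (p ++ [x]) t r := by
  intro r
  induction r with
  | nil => intro t; rfl
  | cons c r' ih =>
      intro t
      show edBrowGo x (edA (p ++ [x]) t)
        (edA p t :: edA p (t ++ [c]) :: Atail p (t ++ [c]) r') (c :: r') = _
      rw [edBrowGo]
      have hcell :
          (if x = c then
            ((edA p t).1, (edA p t).2.map (fun q => (q.1 ++ [x], q.2 ++ [c])))
          else
            let m := min (edA (p ++ [x]) t).1 (min (edA p (t ++ [c])).1 (edA p t).1)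
            let al :=
              (if (edA (p ++ [x]) t).1 = m then (edA (p ++ [x]) t).2.map (fun q => (q.1 ++ ['_'], q.2 ++ [c])) else [])
              ++ (if (edA p (t ++ [c])).1 = m then (edA p (t ++ [c])).2.map (fun q => (q.1 ++ [x], q.2 ++ ['_'])) else [])
              ++ (if (edA p t).1 = m then (edA p t).2.map (fun q => (q.1 ++ [x], q.2 ++ [c])) else [])
            (m + 1, al)) = edA (p ++ [x]) (t ++ [c]) := by
        rw [edA_snoc]
      rw [hcell, Atail, ← ih (t ++ [c])]

theorem rows_spec (ys : List Char) :
    ∀ (xs pfx : List Char),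
      edBrows ys xs pfx (edA pfx [] :: Atail pfx [] ys)
        = edA (pfx ++ xs) [] :: Atail (pfx ++ xs) [] ys := by
  intro xs
  induction xs with
  | nil => intro pfx; simp [edBrows]
  | cons c1 xs' ih =>
      intro pfx
      rw [edBrows]
      have hbase : (((pfx.length : Int) + 1),
          [(pfx ++ [c1], List.replicate (pfx.length + 1) '_')]) = edA (pfx ++ [c1]) [] := by
        rw [edA_snoc_nil]
      rw [hbase, rowGo_spec pfx c1 ys [], ih (pfx ++ [c1])]
      simp

theorem Atail_range (ys : List Char) :
    ∀ (r t : List Char), t ++ r = ys →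
      (List.range' (t.length + 1) r.length).map
        (fun j => ((Int.ofNat j), [(List.replicate j '_', ys.take j)]))
        = Atail [] t r := by
  intro r
  induction r with
  | nil => intro t _; rfl
  | cons c r' ih =>
      intro t hty
      rw [Atail]
      simp only [List.length_cons]
      rw [List.range'_succ, List.map_cons]
      have h1 : ys.take (t.length + 1) = t ++ [c] := by
        have hlen : (t ++ [c]).length = t.length + 1 := by simp
        rw [← hty, show t ++ c :: r' = (t ++ [c]) ++ r' from by simp, ← hlen,
            List.take_left]
      have h2 : edA [] (t ++ [c]) = ((t.length : Int) + 1,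
          [(List.replicate (t.length + 1) '_', t ++ [c])]) := by
        rw [edA_nil_left]; simp
      rw [h1, h2]
      have h3 := ih (t ++ [c]) (by simp [← hty])
      simp only [List.length_append, List.length_cons, List.length_nil] at h3
      rw [show t.length + (0 + 1) + 1 = t.length + 1 + 1 from by omega] at h3
      rw [← h3]
      simp

theorem getLastD_Atail (p : List Char) :
    ∀ (r t : List Char) (z : Int × List (List Char × List Char)),
      (edA p t :: Atail p t r).getLastD z = edA p (t ++ r) := by
  intro r
  induction r with
  | nil => intro t z; simp [Atail]
  | cons c r' ih =>
      intro t z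
      rw [Atail, List.getLastD_cons, ih (t ++ [c]) (edA p t)]
      simp

theorem edA_eq_B (xs ys : List Char) :
    (edBrows ys xs []
        ((List.range (ys.length + 1)).map
          (fun j => ((Int.ofNat j), [(List.replicate j '_', ys.take j)])))).getLastD (0, [])
      = edA xs ys := by
  have hrow0 : (List.range (ys.length + 1)).map
      (fun j => ((Int.ofNat j), [(List.replicate j '_', ys.take j)]))
      = edA [] [] :: Atail [] [] ys := by
    rw [List.range_eq_range', List.range'_succ, List.map_cons]
    have h0 : edA [] [] = ((0 : Int), [([], [])]) := by rw [edA_nil_left]; rfl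
    have h3 := Atail_range ys ys [] (by simp)
    simp only [List.length_nil] at h3
    rw [h0, h3]
    rfl
  rw [hrow0, rows_spec ys xs [], getLastD_Atail]
  simp

-- ===== VERDICT (by name: the statement is the Claim_ definition above) =====
theorem EDalignments_spec : Claim_equal_EDalignments := by
  intro S1 S2 _
  simp only [Spec_EDalignments, EDalignments, EDalignments_alt, edA_eq_B]
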